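-- pv_equiv track=rewrite | github.com/xuxin2023/gas_calibrator | src/gas_calibrator/v2/core/controlled_state_machine_profile.py | _phase_policies_from_trace_event
-- ===== SOURCE A (Python) =====
-- from typing import TYPE_CHECKING, Any, Iterable
--
-- def _phase_policies_from_trace_event(event: dict[str, Any]) -> list[str]:
--     text = " ".join(str(event.get(key) or "") for key in ("action", "message", "route")).strip().lower()
--     rows: list[str] = []
--     if "ambient" in text or "diagnostic" in text:
--         rows.append("ambient_diagnostic")
--     if any(token in text for token in ("retry", "recovery", "abort", "fault_capture")):
--         rows.append("recovery_retry")
--     if any(token in text for token in ("set_pressure", "wait_post_pressure", "pressure stabilized")):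
--         rows.append("pressure_stable")
--     if any(token in text for token in ("sample_start", "sample_end", "sampling")):
--         rows.append("sample_ready")
--     if any(token in text for token in ("pre-seal", "preseal", "wait_route_ready", "wait_dewpoint", "wait_route_soak", "seal_route")):
--         rows.append("preseal")
--     return _dedupe(rows)
--
-- def _dedupe(values: Iterable[Any]) -> list[str]:
--     rows: list[str] = []
--     for value in values:
--         text = str(value or "").strip()
--         if text and text not in rows:
--             rows.append(text)
--     return rows
-- ===== SOURCE B (Python) =====
-- _TOKEN_TAGS = (
--     ("ambient", "ambient_diagnostic"),
--     ("diagnostic", "ambient_diagnostic"),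
--     ("retry", "recovery_retry"),
--     ("recovery", "recovery_retry"),
--     ("abort", "recovery_retry"),
--     ("fault_capture", "recovery_retry"),
--     ("set_pressure", "pressure_stable"),
--     ("wait_post_pressure", "pressure_stable"),
--     ("pressure stabilized", "pressure_stable"),
--     ("sample_start", "sample_ready"),
--     ("sample_end", "sample_ready"),
--     ("sampling", "sample_ready"),
--     ("pre-seal", "preseal"),
--     ("preseal", "preseal"),
--     ("wait_route_ready", "preseal"),
--     ("wait_dewpoint", "preseal"),
--     ("wait_route_soak", "preseal"),
--     ("seal_route", "preseal"),
-- )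
--
-- _TAG_ORDER = ("ambient_diagnostic", "recovery_retry", "pressure_stable", "sample_ready", "preseal")
--
--
-- def _phase_policies_from_trace_event(event):
--     parts = []
--     for key in ("action", "message", "route"):
--         parts.append(str(event.get(key) or ""))
--     text = " ".join(parts).strip().lower()
--     hits = set()
--     for i in range(len(text)):
--         for token, tag in _TOKEN_TAGS:
--             if tag not in hits and text.startswith(token, i):
--                 hits.add(tag)
--     return [tag for tag in _TAG_ORDER if tag in hits]
-- ===== Notes on version B (the rewrite author's own statement) =====
-- stated objective: alternative
-- what changed: Replaces A's per-rule 'token in text' substring tests plus a strip-and-dedupe pass with a position scan: one pass over the text's indices prefix-matching a flat token-to-tag table into a set of hit tags, then the tags are emitted by filtering a fixed canonical order against that set.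
import Mathlib
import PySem

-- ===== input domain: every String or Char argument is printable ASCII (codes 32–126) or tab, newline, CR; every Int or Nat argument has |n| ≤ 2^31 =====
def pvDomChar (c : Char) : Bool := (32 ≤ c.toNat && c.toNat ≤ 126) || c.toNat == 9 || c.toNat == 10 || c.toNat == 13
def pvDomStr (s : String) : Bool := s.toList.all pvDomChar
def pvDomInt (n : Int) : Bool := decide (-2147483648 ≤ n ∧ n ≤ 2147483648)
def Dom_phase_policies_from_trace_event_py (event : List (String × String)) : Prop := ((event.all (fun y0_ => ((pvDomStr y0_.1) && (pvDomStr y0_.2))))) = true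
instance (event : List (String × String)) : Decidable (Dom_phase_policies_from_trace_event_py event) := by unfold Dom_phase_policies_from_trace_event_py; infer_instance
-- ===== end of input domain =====

-- B replaces A's per-rule substring tests plus strip-and-dedupe helper with a position scan:
-- one pass over the text's positions prefix-matching a flat token→tag table into a set of hit
-- tags, emitted in a fixed canonical order (alternative decomposition; same output).

-- ===== PORT A =====
-- text = " ".join(str(event.get(key) or "") for key in (...)).strip().lower()
-- ('x or ""' on a str/None value equals dict-get with default "")
def pvEventText (event : List (String × String)) : String :=
  PySem.Str.lower (PySem.Str.strip (PySem.Str.join " "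
    (["action", "message", "route"].map (fun key => (PySem.Dict.mk event).getD key ""))))

-- helper _dedupe (str(value or "") on a str value is the value itself)
def pyDedupe (values : List String) : List String :=
  values.foldl (fun rows value =>
    let text := PySem.Str.strip value
    if text ≠ "" ∧ text ∉ rows then rows ++ [text] else rows) []

def phase_policies_from_trace_event_py (event : List (String × String)) : List String :=
  let text := pvEventText event
  let rows : List String := []
  let rows := if PySem.Str.isIn "ambient" text || PySem.Str.isIn "diagnostic" text then rows ++ ["ambient_diagnostic"] else rows
  let rows := if (["retry", "recovery", "abort", "fault_capture"].any fun token => PySem.Str.isIn token text) then rows ++ ["recovery_retry"] else rows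
  let rows := if (["set_pressure", "wait_post_pressure", "pressure stabilized"].any fun token => PySem.Str.isIn token text) then rows ++ ["pressure_stable"] else rows
  let rows := if (["sample_start", "sample_end", "sampling"].any fun token => PySem.Str.isIn token text) then rows ++ ["sample_ready"] else rows
  let rows := if (["pre-seal", "preseal", "wait_route_ready", "wait_dewpoint", "wait_route_soak", "seal_route"].any fun token => PySem.Str.isIn token text) then rows ++ ["preseal"] else rows
  pyDedupe rows

-- ===== PORT B =====
def pvTokenTags : List (String × String) :=
  [ ("ambient", "ambient_diagnostic"),
    ("diagnostic", "ambient_diagnostic"),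
    ("retry", "recovery_retry"),
    ("recovery", "recovery_retry"),
    ("abort", "recovery_retry"),
    ("fault_capture", "recovery_retry"),
    ("set_pressure", "pressure_stable"),
    ("wait_post_pressure", "pressure_stable"),
    ("pressure stabilized", "pressure_stable"),
    ("sample_start", "sample_ready"),
    ("sample_end", "sample_ready"),
    ("sampling", "sample_ready"),
    ("pre-seal", "preseal"),
    ("preseal", "preseal"),
    ("wait_route_ready", "preseal"),
    ("wait_dewpoint", "preseal"),
    ("wait_route_soak", "preseal"),
    ("seal_route", "preseal") ]

def pvTagOrder : List String :=
  ["ambient_diagnostic", "recovery_retry", "pressure_stable", "sample_ready", "preseal"]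

-- Source B builds parts with an explicit loop, then the same join/strip/lower
def pvAltText (event : List (String × String)) : String :=
  let parts := ["action", "message", "route"].foldl
    (fun parts key => parts ++ [(PySem.Dict.mk event).getD key ""]) []
  PySem.Str.lower (PySem.Str.strip (PySem.Str.join " " parts))

-- text.startswith(token, i) for 0 ≤ i < len(text) is a prefix test on text[i:]
def phase_policies_from_trace_event_py_alt (event : List (String × String)) : List String :=
  let text := (pvAltText event).toList
  let hits : PySem.Set String :=
    (List.range text.length).foldl (fun hits i =>
      pvTokenTags.foldl (fun hits tt =>
        if ¬ hits.contains tt.2 ∧ PySem.Chars.startswith (text.drop i) tt.1.toList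
        then PySem.Set.add hits tt.2 else hits) hits) PySem.Set.empty
  pvTagOrder.filter (fun tag => hits.contains tag)

-- ===== PRECONDITION & SPEC =====
def Spec_phase_policies_from_trace_event_py (event : List (String × String)) (out : List String) : Prop := out = phase_policies_from_trace_event_py_alt event
instance (event : List (String × String)) (out : List String) : Decidable (Spec_phase_policies_from_trace_event_py event out) := by unfold Spec_phase_policies_from_trace_event_py; infer_instance

-- ===== CLAIM (what is proved, stated in full; the proofs are below) =====
def Claim_equal_phase_policies_from_trace_event_py : Prop := ∀ (event : List (String × String)), Dom_phase_policies_from_trace_event_py event → Spec_phase_policies_from_trace_event_py event (phase_policies_from_trace_event_py event)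


-- ===== LEMMAS AND PROOFS =====

-- membership after a Python set.add (specific to B's hit accumulator)
theorem pvContains_add (s : PySem.Set String) (x y : String) : (PySem.Set.add s y).contains x = (s.contains x || x == y) := by
  rw [Bool.eq_iff_iff]
  simp only [PySem.Set.add]
  split_ifs with h <;> simp_all [List.contains_eq_mem, beq_iff_eq]

-- membership after B's inner loop over the token table at one position
theorem pvContains_inner (text : List Char) (i : Nat) (l : List (String × String)) (h : PySem.Set String) (x : String) :
    ((l.foldl (fun hits tt =>
        if ¬ hits.contains tt.2 ∧ PySem.Chars.startswith (text.drop i) tt.1.toList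
        then PySem.Set.add hits tt.2 else hits) h).contains x)
    = (h.contains x || l.any fun tt => tt.2 == x && PySem.Chars.startswith (text.drop i) tt.1.toList) := by
  induction l generalizing h with
  | nil => simp
  | cons tt ts ih =>
    simp only [List.foldl_cons, List.any_cons]
    split_ifs with hc
    · rw [ih, pvContains_add, Bool.eq_iff_iff]
      rcases hc with ⟨_, hs⟩
      rcases eq_or_ne tt.2 x with heq | hne
      · subst heq; simp_all [List.contains_eq_mem]
      · have h1 : (tt.2 == x) = false := beq_eq_false_iff_ne.mpr hne
        have h2 : (x == tt.2) = false := beq_eq_false_iff_ne.mpr (Ne.symm hne)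
        simp_all [List.contains_eq_mem]
    · rw [ih, Bool.eq_iff_iff]
      rw [Classical.not_and_iff_not_or_not, not_not] at hc
      rcases hc with hc | hs
      · rcases eq_or_ne tt.2 x with heq | hne
        · subst heq; simp_all [List.contains_eq_mem]
        · have h1 : (tt.2 == x) = false := beq_eq_false_iff_ne.mpr hne
          simp_all
      · simp_all

-- membership after B's position scan
theorem pvContains_outer (text : List Char) (ns : List Nat) (h : PySem.Set String) (x : String) :
    ((ns.foldl (fun hits i =>
        pvTokenTags.foldl (fun hits tt =>
          if ¬ hits.contains tt.2 ∧ PySem.Chars.startswith (text.drop i) tt.1.toList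
          then PySem.Set.add hits tt.2 else hits) hits) h).contains x)
    = (h.contains x || ns.any fun i => pvTokenTags.any fun tt => tt.2 == x && PySem.Chars.startswith (text.drop i) tt.1.toList) := by
  induction ns generalizing h with
  | nil => simp
  | cons n ms ih =>
    simp only [List.foldl_cons, List.any_cons, ih, pvContains_inner, Bool.or_assoc]

theorem pvList_any_or (l : List Nat) (p q : Nat → Bool) : (l.any fun x => p x || q x) = (l.any p || l.any q) := by
  induction l with
  | nil => rfl
  | cons x xs ih => simp only [List.any_cons, ih]; cases p x <;> cases q x <;> simp

-- a nonempty token occurs as a prefix at some scanned position iff it is a substring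
theorem pvAnyRange_eq_isIn (tok text : List Char) (h : tok ≠ []) :
    ((List.range text.length).any fun i => PySem.Chars.startswith (text.drop i) tok) = PySem.Chars.isIn tok text := by
  rw [Bool.eq_iff_iff]
  simp only [List.any_eq_true, List.mem_range, PySem.Chars.startswith_iff]
  rw [← PySem.Chars.exists_prefix_drop_iff_isIn]
  constructor
  · rintro ⟨i, _, hp⟩; exact ⟨i, hp⟩
  · rintro ⟨j, hp⟩
    by_cases hj : j < text.length
    · exact ⟨j, hj, hp⟩
    · rw [List.drop_eq_nil_of_le (by omega)] at hp
      exact absurd (List.prefix_nil.mp hp) h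

-- per-tag characterisations of the scan
theorem pvHits_tag1 (text : List Char) :
    ((List.range text.length).any fun i => pvTokenTags.any fun tt => tt.2 == "ambient_diagnostic" && PySem.Chars.startswith (text.drop i) tt.1.toList)
    = (PySem.Chars.isIn "ambient".toList text || PySem.Chars.isIn "diagnostic".toList text) := by
  simp only [pvTokenTags, List.any_cons, List.any_nil, String.reduceBEq,
    Bool.false_and, Bool.true_and, Bool.or_false]
  rw [pvList_any_or]
  rw [pvAnyRange_eq_isIn _ _ (by decide), pvAnyRange_eq_isIn _ _ (by decide)]

theorem pvHits_tag2 (text : List Char) :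
    ((List.range text.length).any fun i => pvTokenTags.any fun tt => tt.2 == "recovery_retry" && PySem.Chars.startswith (text.drop i) tt.1.toList)
    = (PySem.Chars.isIn "retry".toList text || (PySem.Chars.isIn "recovery".toList text || (PySem.Chars.isIn "abort".toList text || PySem.Chars.isIn "fault_capture".toList text))) := by
  simp only [pvTokenTags, List.any_cons, List.any_nil, String.reduceBEq,
    Bool.false_and, Bool.true_and, Bool.false_or, Bool.or_false]
  rw [pvList_any_or, pvList_any_or, pvList_any_or]
  rw [pvAnyRange_eq_isIn _ _ (by decide), pvAnyRange_eq_isIn _ _ (by decide), pvAnyRange_eq_isIn _ _ (by decide), pvAnyRange_eq_isIn _ _ (by decide)]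

theorem pvHits_tag3 (text : List Char) :
    ((List.range text.length).any fun i => pvTokenTags.any fun tt => tt.2 == "pressure_stable" && PySem.Chars.startswith (text.drop i) tt.1.toList)
    = (PySem.Chars.isIn "set_pressure".toList text || (PySem.Chars.isIn "wait_post_pressure".toList text || PySem.Chars.isIn "pressure stabilized".toList text)) := by
  simp only [pvTokenTags, List.any_cons, List.any_nil, String.reduceBEq,
    Bool.false_and, Bool.true_and, Bool.false_or, Bool.or_false]
  rw [pvList_any_or, pvList_any_or]
  rw [pvAnyRange_eq_isIn _ _ (by decide), pvAnyRange_eq_isIn _ _ (by decide), pvAnyRange_eq_isIn _ _ (by decide)]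

theorem pvHits_tag4 (text : List Char) :
    ((List.range text.length).any fun i => pvTokenTags.any fun tt => tt.2 == "sample_ready" && PySem.Chars.startswith (text.drop i) tt.1.toList)
    = (PySem.Chars.isIn "sample_start".toList text || (PySem.Chars.isIn "sample_end".toList text || PySem.Chars.isIn "sampling".toList text)) := by
  simp only [pvTokenTags, List.any_cons, List.any_nil, String.reduceBEq,
    Bool.false_and, Bool.true_and, Bool.false_or, Bool.or_false]
  rw [pvList_any_or, pvList_any_or]
  rw [pvAnyRange_eq_isIn _ _ (by decide), pvAnyRange_eq_isIn _ _ (by decide), pvAnyRange_eq_isIn _ _ (by decide)]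

theorem pvHits_tag5 (text : List Char) :
    ((List.range text.length).any fun i => pvTokenTags.any fun tt => tt.2 == "preseal" && PySem.Chars.startswith (text.drop i) tt.1.toList)
    = (PySem.Chars.isIn "pre-seal".toList text || (PySem.Chars.isIn "preseal".toList text || (PySem.Chars.isIn "wait_route_ready".toList text || (PySem.Chars.isIn "wait_dewpoint".toList text || (PySem.Chars.isIn "wait_route_soak".toList text || PySem.Chars.isIn "seal_route".toList text))))) := by
  simp only [pvTokenTags, List.any_cons, List.any_nil, String.reduceBEq,
    Bool.false_and, Bool.true_and, Bool.false_or, Bool.or_false]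
  rw [pvList_any_or, pvList_any_or, pvList_any_or, pvList_any_or, pvList_any_or]
  rw [pvAnyRange_eq_isIn _ _ (by decide), pvAnyRange_eq_isIn _ _ (by decide), pvAnyRange_eq_isIn _ _ (by decide),
      pvAnyRange_eq_isIn _ _ (by decide), pvAnyRange_eq_isIn _ _ (by decide), pvAnyRange_eq_isIn _ _ (by decide)]


-- the 32-case core: A's conditional appends + dedupe vs B's ordered filter, on the five rule booleans
theorem pvAssemble (b1 b2 b3 b4 b5 : Bool) :
    pyDedupe (
      let r1 : List String := if b1 then [] ++ ["ambient_diagnostic"] else []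
      let r2 := if b2 then r1 ++ ["recovery_retry"] else r1
      let r3 := if b3 then r2 ++ ["pressure_stable"] else r2
      let r4 := if b4 then r3 ++ ["sample_ready"] else r3
      if b5 then r4 ++ ["preseal"] else r4)
    = (let s5 : List String := if b5 then ["preseal"] else []
       let s4 := if b4 then "sample_ready" :: s5 else s5
       let s3 := if b3 then "pressure_stable" :: s4 else s4
       let s2 := if b2 then "recovery_retry" :: s3 else s3
       if b1 then "ambient_diagnostic" :: s2 else s2) := by
  cases b1 <;> cases b2 <;> cases b3 <;> cases b4 <;> cases b5 <;> decide

-- ===== VERDICT (by name: the statement is the Claim_ definition above) =====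
theorem phase_policies_from_trace_event_py_spec : Claim_equal_phase_policies_from_trace_event_py := by
  intro event _
  unfold Spec_phase_policies_from_trace_event_py
  unfold phase_policies_from_trace_event_py phase_policies_from_trace_event_py_alt
  have hT : pvAltText event = pvEventText event := rfl
  rw [hT]
  generalize pvEventText event = T
  simp only [pvTagOrder, List.filter_cons, List.filter_nil]
  rw [pvContains_outer, pvContains_outer, pvContains_outer, pvContains_outer, pvContains_outer]
  simp only [show ∀ x : String, (PySem.Set.empty : PySem.Set String).contains x = false from fun _ => rfl, Bool.false_or]
  rw [pvHits_tag1, pvHits_tag2, pvHits_tag3, pvHits_tag4, pvHits_tag5]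
  simp only [PySem.Str.isIn_eq, List.any_cons, List.any_nil, Bool.or_false]
  exact pvAssemble _ _ _ _ _
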